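-- pv_equiv track=rewrite | github.com/LeedsJohn/tr-downloader | src/formatter.py | cropEnd
-- ===== SOURCE A (Python) =====
-- def cropEnd(lastChar, log):
--     """
--     Cuts the last letter from the typing log if there is
--     an extra character typed.
--     Example: https://data.typeracer.com/pit/result?id=|tr:professorxwing|5942
--     """
--     i = len(log) - 1
--     while i >= 0:
--         if lastChar not in log[i][0]:
--             log.pop()
--         else:
--             endIndex = log[i][0].find(lastChar)
--             log[i][0] = log[i][0][:endIndex + 1]
--             return log
--         i -= 1
-- ===== SOURCE B (Python) =====
-- def cropEnd(lastChar, log):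
--     idx = None
--     for i, entry in enumerate(log):
--         if entry and lastChar in entry[0]:
--             idx = i
--     if idx is None:
--         log.clear()
--         return None
--     s = log[idx][0]
--     log[idx][0] = s[:s.find(lastChar) + 1]
--     del log[idx + 1:]
--     return log
-- ===== Notes on version B (the rewrite author's own statement) =====
-- stated objective: alternative
-- what changed: Replaced A's backward while-loop that pops trailing entries one by one with a single forward pass that records the last index whose first field contains lastChar, then truncates the list in bulk and trims that entry's string; B skips empty entries, so it returns where A raises IndexError (outside Pre_).
import Mathlib
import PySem

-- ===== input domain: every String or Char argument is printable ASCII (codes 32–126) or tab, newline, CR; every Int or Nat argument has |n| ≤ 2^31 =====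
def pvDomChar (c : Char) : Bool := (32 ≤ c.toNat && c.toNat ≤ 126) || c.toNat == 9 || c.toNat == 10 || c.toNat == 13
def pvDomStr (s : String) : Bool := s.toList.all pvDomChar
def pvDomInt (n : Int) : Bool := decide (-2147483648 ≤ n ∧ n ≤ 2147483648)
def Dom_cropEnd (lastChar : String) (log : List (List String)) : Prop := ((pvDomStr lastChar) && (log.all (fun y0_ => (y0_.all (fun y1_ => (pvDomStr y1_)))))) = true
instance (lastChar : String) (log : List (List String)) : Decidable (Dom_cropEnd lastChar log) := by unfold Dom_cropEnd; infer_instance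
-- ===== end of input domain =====

-- B replaces A's backward pop-one-by-one loop by a single forward pass that finds the
-- last matching index and truncates in bulk (objective: alternative decomposition).
-- Both Pythons mutate `log` in place; the equivalence proved here is about the RETURN value only
-- (B performs the same net mutation: log holds the returned list, or is cleared when None).

-- ===== PORT A =====
-- A's backward `while i >= 0` loop with `log.pop()`: structurally, a recursion over
-- log.reverse, where the found case returns the untouched prefix plus the modified entry.
-- `log[i][0]` is ported as `e.headD ""` — exact under Pre_cropEnd (Python raises IndexError
-- on an empty entry the scan inspects; Pre_ excludes exactly those inputs).
def cropEndLoopA (lastChar : String) : List (List String) → Option (List (List String))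
  | [] => none
  | e :: rest =>
      let s := e.headD ""
      if PySem.Str.isIn lastChar s then
        some (rest.reverse ++ [PySem.Str.slice s none (some (PySem.Str.find s lastChar + 1)) :: e.tail])
      else
        cropEndLoopA lastChar rest

def cropEnd (lastChar : String) (log : List (List String)) : Option (List (List String)) :=
  cropEndLoopA lastChar log.reverse

-- ===== PORT B =====
-- forward pass: final value of `idx` after the for-loop over enumerate(log);
-- `entry and lastChar in entry[0]` → `!e.isEmpty && isIn lastChar e.headD ""`
def cropEndIdx (lastChar : String) (log : List (List String)) : Option Int :=
  (PySem.List.enumerate log 0).foldl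
    (fun acc p => if (!p.2.isEmpty) && PySem.Str.isIn lastChar (p.2.headD "") then some p.1 else acc) none

def cropEnd_alt (lastChar : String) (log : List (List String)) : Option (List (List String)) :=
  match cropEndIdx lastChar log with
  | none => none
  | some i =>
      let e := (PySem.List.pyGet? log i).getD []
      let s := e.headD ""
      some (PySem.List.slice log none (some i) ++
            [PySem.Str.slice s none (some (PySem.Str.find s lastChar + 1)) :: e.tail])

-- ===== PRECONDITION & SPEC =====
-- Pre_ is exactly A's non-crash set: A raises IndexError at log[i][0] iff some empty entry
-- has no later entry whose first field contains lastChar (the backward scan reaches it);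
-- every input on which Python A returns satisfies Pre_.
def Pre_cropEnd (lastChar : String) (log : List (List String)) : Prop :=
  ∀ i < log.length, log.getD i [] = [] →
    ∃ j < log.length, i < j ∧ log.getD j [] ≠ [] ∧
      PySem.Str.isIn lastChar ((log.getD j []).headD "") = true
instance (lastChar : String) (log : List (List String)) : Decidable (Pre_cropEnd lastChar log) := by
  unfold Pre_cropEnd; infer_instance

def pvWitness_cropEnd : String × List (List String) := ("a", [["xa", "1"], ["xyz"]])

def Spec_cropEnd (lastChar : String) (log : List (List String)) (out : Option (List (List String))) : Prop := out = cropEnd_alt lastChar log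
instance (lastChar : String) (log : List (List String)) (out : Option (List (List String))) : Decidable (Spec_cropEnd lastChar log out) := by unfold Spec_cropEnd; infer_instance

-- ===== CLAIM (what is proved, stated in full; the proofs are below) =====
def Claim_equal_cropEnd : Prop := ∀ (lastChar : String) (log : List (List String)), Dom_cropEnd lastChar log → Pre_cropEnd lastChar log → Spec_cropEnd lastChar log (cropEnd lastChar log)

-- ===== LEMMAS AND PROOFS =====

-- the index fold over log ++ [e] in terms of the fold over log
theorem cropEndIdx_append (lastChar : String) (log : List (List String)) (e : List String) :
    cropEndIdx lastChar (log ++ [e]) =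
      if (!e.isEmpty) && PySem.Str.isIn lastChar (e.headD "") then some (log.length : Int)
      else cropEndIdx lastChar log := by
  simp [cropEndIdx, PySem.List.enumerate_append, List.foldl_append, PySem.List.enumerate]

-- any index the fold returns is a Nat-cast position inside log
theorem cropEndIdx_bound (lastChar : String) (log : List (List String)) (i : Int)
    (h : cropEndIdx lastChar log = some i) :
    ∃ k : Nat, i = (k : Int) ∧ k < log.length := by
  induction log using List.reverseRecOn with
  | nil => simp [cropEndIdx] at h
  | append_singleton init e ih =>
      rw [cropEndIdx_append] at h
      split at h
      · exact ⟨init.length, by simpa using h.symm, by simp⟩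
      · obtain ⟨k, hk, hlt⟩ := ih h
        exact ⟨k, hk, by simpa using Nat.lt_succ_of_lt hlt⟩

-- Pre on log ++ [e] restricts to Pre on log when e does not match
theorem pre_dropLast (lastChar : String) (init : List (List String)) (e : List String)
    (hc : ¬ ((!e.isEmpty) && PySem.Str.isIn lastChar (e.headD "")) = true)
    (h : Pre_cropEnd lastChar (init ++ [e])) : Pre_cropEnd lastChar init := by
  intro i hi hempty
  have hi' : i < (init ++ [e]).length := by simp; omega
  have hgi : (init ++ [e]).getD i [] = [] := by
    rwa [List.getD_append _ _ _ _ hi]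
  obtain ⟨j, hj, hij, hne, hmatch⟩ := h i hi' hgi
  have hjlen : j < init.length := by
    rcases Nat.lt_or_ge j init.length with h' | h'
    · exact h'
    · exfalso
      have hje : j = init.length := by simp at hj; omega
      have : (init ++ [e]).getD j [] = e := by
        subst hje; simp [List.getD_eq_getElem?_getD]
      rw [this] at hne hmatch
      apply hc
      simp only [Bool.and_eq_true]
      exact ⟨by simp [hne], hmatch⟩
  refine ⟨j, hjlen, hij, ?_, ?_⟩
  · rwa [List.getD_append _ _ _ _ hjlen] at hne
  · rwa [List.getD_append _ _ _ _ hjlen] at hmatch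

-- main agreement lemma
theorem cropEnd_agree (lastChar : String) (log : List (List String))
    (hPre : Pre_cropEnd lastChar log) :
    cropEnd lastChar log = cropEnd_alt lastChar log := by
  induction log using List.reverseRecOn with
  | nil => simp [cropEnd, cropEnd_alt, cropEndLoopA, cropEndIdx]
  | append_singleton init e ih =>
      by_cases hb : ((!e.isEmpty) && PySem.Str.isIn lastChar (e.headD "")) = true
      · -- last entry nonempty and matches: both return init ++ [modified e]
        simp only [Bool.and_eq_true] at hb
        obtain ⟨hbe, hbm⟩ := hb
        have hne : e ≠ [] := by simpa using hbe
        have hm' : PySem.Chars.isIn lastChar.toList ((e.head?.getD "")).toList = true := by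
          simpa using hbm
        simp [cropEnd, cropEndLoopA, hm', cropEnd_alt, cropEndIdx_append, hne,
          PySem.List.slice_to_natCast]
      · -- last entry empty or non-matching
        by_cases hne : e = []
        · -- empty last entry: Pre_ is contradicted (no later entry exists)
          exfalso
          have hlen : init.length < (init ++ [e]).length := by simp
          have hempty : (init ++ [e]).getD init.length [] = [] := by
            simp [hne, List.getD_eq_getElem?_getD]
          obtain ⟨j, hj, hij, _, _⟩ := hPre init.length hlen hempty
          simp at hj; omega
        · -- nonempty, non-matching: both reduce to the question on init
          have hcC : ¬ PySem.Chars.isIn lastChar.toList ((e.head?.getD "")).toList = true := by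
            intro h
            apply hb
            simp only [Bool.and_eq_true]
            exact ⟨by simp [hne], by simpa using h⟩
          have hstep : cropEnd lastChar (init ++ [e]) = cropEnd lastChar init := by
            simp only [cropEnd, List.reverse_append, List.reverse_singleton,
              List.singleton_append, cropEndLoopA]
            simp [hcC]
          rw [hstep, ih (pre_dropLast lastChar init e hb hPre),
            cropEnd_alt, cropEnd_alt, cropEndIdx_append, if_neg hb]

          cases hidx : cropEndIdx lastChar init with
          | none => rfl
          | some i =>
              obtain ⟨k, rfl, hk⟩ := cropEndIdx_bound lastChar init i hidx
              have hget : PySem.List.pyGet? (init ++ [e]) (k : Int) = PySem.List.pyGet? init (k : Int) := by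
                simp [PySem.List.pyGet?_natCast, List.getElem?_append_left hk]
              have hslice : PySem.List.slice (init ++ [e]) none (some (k : Int)) =
                  PySem.List.slice init none (some (k : Int)) := by
                simp [PySem.List.slice_to_natCast, List.take_append_of_le_length (Nat.le_of_lt hk)]
              simp [hget, hslice]

-- ===== VERDICT (by name: the statements are the Claim_ definitions above) =====
theorem cropEnd_spec : Claim_equal_cropEnd := by
  intro lastChar log _ hPre
  unfold Spec_cropEnd
  exact cropEnd_agree lastChar log hPre
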